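-- pv_equiv track=rewrite | github.com/AustinWise/bzimage | bzimage3.py | blocksize
-- ===== SOURCE A (Python) =====
-- def blocksize(worklist): #for progress calculation displays
--     blocklist = []
--     if len(worklist) < 30:
--         blocklist.append((0,len(worklist)))
--     else:
--         block = len(worklist)
--         for block in range(block//30):
--             start = block*30
--             end = start+30
--             blocklist.append((start,end))
--     if blocklist[-1][1] != len(worklist):
--         blocklist.append((blocklist[-1][1],len(worklist))) #append the remainder block if there is one
--     return int(len(blocklist))
-- ===== SOURCE B (Python) =====
-- def blocksize(worklist):
--     # Closed form: ceil(n/30) blocks, but always at least 1 (A emits one block even for n < 30).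
--     n = len(worklist)
--     return 1 if n < 30 else -(-n // 30)
-- ===== Notes on version B (the rewrite author's own statement) =====
-- stated objective: simpler
-- what changed: Replaces the block-list construction loop with the closed-form ceiling division: 1 if n<30 else ceil(n/30) on the length.
import Mathlib
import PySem

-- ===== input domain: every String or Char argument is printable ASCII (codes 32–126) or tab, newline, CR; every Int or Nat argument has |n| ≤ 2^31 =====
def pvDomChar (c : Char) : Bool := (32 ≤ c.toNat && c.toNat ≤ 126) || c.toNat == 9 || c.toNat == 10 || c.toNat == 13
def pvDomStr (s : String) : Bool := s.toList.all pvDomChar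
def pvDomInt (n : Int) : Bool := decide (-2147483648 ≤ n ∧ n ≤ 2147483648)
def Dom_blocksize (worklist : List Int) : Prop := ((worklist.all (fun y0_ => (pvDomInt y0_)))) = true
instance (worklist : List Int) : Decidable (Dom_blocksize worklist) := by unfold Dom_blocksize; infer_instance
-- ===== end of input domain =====

-- B replaces A's block-list building loop with the closed-form ceiling division on the length (simpler).

-- ===== PORT A =====
-- literal transliteration of A: build blocklist, append remainder block, return its length
def blocksize (worklist : List Int) : Int :=
  let n : Int := (worklist.length : Int)
  let blocklist : List (Int × Int) :=
    if n < 30 then [(0, n)]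
    else (PySem.List.pyRange 0 (PySem.Int.floordiv n 30) 1).foldl
      (fun bl block => bl ++ [(block * 30, block * 30 + 30)]) []
  match PySem.List.pyGet? blocklist (-1) with
  | none => 0  -- unreachable: blocklist is always nonempty (Python never raises here)
  | some p =>
    let blocklist := if p.2 ≠ n then blocklist ++ [(p.2, n)] else blocklist
    (blocklist.length : Int)

-- ===== PORT B =====
def blocksize_alt (worklist : List Int) : Int :=
  let n : Int := (worklist.length : Int)
  if n < 30 then 1 else -(PySem.Int.floordiv (-n) 30)

-- ===== PRECONDITION & SPEC =====
def Spec_blocksize (worklist : List Int) (out : Int) : Prop := out = blocksize_alt worklist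
instance (worklist : List Int) (out : Int) : Decidable (Spec_blocksize worklist out) := by unfold Spec_blocksize; infer_instance

-- ===== CLAIM (what is proved, stated in full; the proofs are below) =====
def Claim_equal_blocksize : Prop := ∀ (worklist : List Int), Dom_blocksize worklist → Spec_blocksize worklist (blocksize worklist)

-- ===== LEMMAS AND PROOFS =====

-- the loop body of A
def pvF : List (Int × Int) → Int → List (Int × Int) :=
  fun bl block => bl ++ [(block * 30, block * 30 + 30)]

def pvL (k : Nat) : List (Int × Int) := (PySem.List.pyRange 0 (k : Int) 1).foldl pvF []

theorem pvL_succ (k : Nat) : pvL (k + 1) = pvL k ++ [((k : Int) * 30, (k : Int) * 30 + 30)] := by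
  unfold pvL
  have h : PySem.List.pyRange 0 ((k : Int) + 1) 1
      = PySem.List.pyRange 0 (k : Int) 1 ++ [(k : Int)] :=
    PySem.List.pyRange_one_succ_right (by positivity)
  push_cast
  rw [h, List.foldl_append]
  rfl

theorem pvL_length (k : Nat) : (pvL k).length = k := by
  induction k with
  | zero => simp [pvL, PySem.List.pyRange]
  | succ k ih => rw [pvL_succ]; simp [ih]

theorem pvL_last (k : Nat) :
    PySem.List.pyGet? (pvL (k + 1)) (-1) = some ((k : Int) * 30, (k : Int) * 30 + 30) := by
  rw [pvL_succ]
  exact PySem.List.pyGet?_neg_one_append_singleton _ _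

theorem blocksize_eq (worklist : List Int) :
    blocksize worklist = blocksize_alt worklist := by
  unfold blocksize blocksize_alt
  set m := worklist.length with hm
  by_cases h : (m : Int) < 30
  · simp [h, PySem.List.pyGet?_neg_one]
  · simp only [h, if_false]
    have hm30 : 30 ≤ m := by exact_mod_cast not_lt.mp h
    have hk : PySem.Int.floordiv (m : Int) 30 = ((m / 30 : Nat) : Int) := by
      exact_mod_cast PySem.Int.floordiv_natCast m 30
    set k : Nat := m / 30 with hkdef
    have hk1 : 1 ≤ k := Nat.one_le_div_iff (by norm_num) |>.mpr hm30
    obtain ⟨j, hj⟩ : ∃ j, k = j + 1 := ⟨k - 1, by omega⟩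
    have hfold : (PySem.List.pyRange 0 (PySem.Int.floordiv (m : Int) 30) 1).foldl
        (fun bl block => bl ++ [(block * 30, block * 30 + 30)]) [] = pvL k := by
      rw [hk]; rfl
    rw [hfold, hj, pvL_last j]
    simp only
    have hceil : -(PySem.Int.floordiv (-(m : Int)) 30)
        = (k : Int) + (if (j : Int) * 30 + 30 = (m : Int) then 0 else 1) := by
      have hdiv : m = 30 * k + m % 30 := (Nat.div_add_mod m 30).symm ▸ by omega
      have hr : m % 30 < 30 := Nat.mod_lt _ (by norm_num)
      rw [PySem.Int.neg_floordiv_neg_eq_iff_of_pos (by norm_num)]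
      split_ifs with he
      · constructor <;> [skip; skip] <;>
        · have : (m : Int) = ((j : Int) + 1) * 30 := by linarith [he]
          omega
      · have hne : (m : Int) ≠ ((j : Int) + 1) * 30 := by
          intro hc; apply he; linarith [hc]
        constructor <;>
        · push_cast at hne ⊢
          omega
    by_cases he : (j : Int) * 30 + 30 = (m : Int)
    · simp only [he, if_neg (by simp : ¬ (m : Int) ≠ (m : Int))]
      rw [hceil]
      simp [he, pvL_length, hj]
    · simp only [if_pos (by exact he : (j : Int) * 30 + 30 ≠ (m : Int))]
      rw [hceil]
      simp [he, pvL_length, hj]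

-- ===== VERDICT (by name: the statement is the Claim_ definition above) =====
theorem blocksize_spec : Claim_equal_blocksize := by
  intro w _
  exact blocksize_eq w
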